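-- pv_equiv track=rewrite | github.com/minus9d/programming_contest_archive | arc/117/c/c.not-finished.py | solve_fast
-- ===== SOURCE A (Python) =====
-- def solve_fast(s):
--     ch1 = s[0]
--     for ch2 in s[1:]:
--         if ch1 == ch2:
--             new_ch = ch1
--         elif set([ch1, ch2]) == set('RW'):
--             new_ch = 'B'
--         elif set([ch1, ch2]) == set('BW'):
--             new_ch = 'R'
--         elif set([ch1, ch2]) == set('RB'):
--             new_ch = 'W'
--
--         ch1 = new_ch
--
--     return ch1
-- ===== SOURCE B (Python) =====
-- def solve_fast(s):
--     if len(s) == 1: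
--         return s[0]
--     enc = {'R': 0, 'W': 1, 'B': 2}
--     # alternating-sign sum of the encoded colours (sign +,-,+,- from the left)
--     alt = 0
--     sign = 1
--     for c in s:
--         alt += sign * enc[c]
--         sign = -sign
--     total = alt + enc[s[0]]
--     if len(s) % 2 == 1:
--         total = -total
--     return 'RWB'[total % 3]
-- ===== Notes on version B (the rewrite author's own statement) =====
-- stated objective: simpler
-- what changed: Replaced the pairwise colour-combine fold (branching on two-element sets each step) by a closed-form computation: encode R,W,B as 0,1,2, take one alternating-sign sum over the string plus the first character, negate for odd length, and decode (sum mod 3) back to a colour.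
-- outside the precondition, e.g. on solve_fast('xx'): A returns 'x', B raises KeyError; on solve_fast('aab'): A returns 'a', B raises KeyError
import Mathlib
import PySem

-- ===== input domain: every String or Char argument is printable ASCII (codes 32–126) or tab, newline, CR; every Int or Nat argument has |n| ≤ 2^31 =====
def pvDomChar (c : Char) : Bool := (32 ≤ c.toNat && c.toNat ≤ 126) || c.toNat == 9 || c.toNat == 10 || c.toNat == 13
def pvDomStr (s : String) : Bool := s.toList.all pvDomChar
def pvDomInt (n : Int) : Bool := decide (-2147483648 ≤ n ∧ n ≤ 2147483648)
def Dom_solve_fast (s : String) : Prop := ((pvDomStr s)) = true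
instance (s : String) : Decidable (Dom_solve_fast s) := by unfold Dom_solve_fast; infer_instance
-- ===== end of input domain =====

-- B replaces A's per-step colour-combine fold by a closed-form alternating-sign sum mod 3 (objective: simpler).

-- ===== PORT A =====
-- set([ch1, ch2]) == set(xy) with xy a two-char string
def pvSetPairEq (ch1 ch2 x y : Char) : Bool :=
  PySem.Set.equal (PySem.Set.ofList [ch1, ch2]) (PySem.Set.ofList [x, y])

-- one loop iteration; state = (ch1, new_ch as Option — none models "new_ch not yet bound");
-- outer Option none models the UnboundLocalError raise (excluded by Pre_)
def pvStepA (st : Option (Char × Option Char)) (ch2 : Char) : Option (Char × Option Char) :=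
  match st with
  | none => none
  | some (ch1, newch) =>
    let nc : Option Char :=
      if ch1 == ch2 then some ch1
      else if pvSetPairEq ch1 ch2 'R' 'W' then some 'B'
      else if pvSetPairEq ch1 ch2 'B' 'W' then some 'R'
      else if pvSetPairEq ch1 ch2 'R' 'B' then some 'W'
      else newch
    match nc with
    | none => none
    | some c => some (c, nc)

def solve_fast (s : String) : String :=
  match PySem.Str.pyGet? s 0 with        -- ch1 = s[0]; none = IndexError (outside Pre_)
  | none => ""
  | some c0 =>
    match (PySem.List.slice s.toList (some 1) none).foldl pvStepA (some (c0, none)) with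
    | some (ch1, _) => String.ofList [ch1]
    | none => ""                          -- UnboundLocalError (outside Pre_)

-- ===== PORT B =====
-- enc[c]; a key error (chars other than R/W/B) is excluded by Pre_
def pvEnc (c : Char) : Int :=
  if c == 'R' then 0 else if c == 'W' then 1 else 2

def solve_fast_alt (s : String) : String :=
  if PySem.Str.len s == 1 then
    match PySem.Str.pyGet? s 0 with | some c => String.ofList [c] | none => ""
  else
    -- alt/sign loop: alt += sign * enc[c]; sign = -sign
    let p := s.toList.foldl (fun (st : Int × Int) c => (st.1 + st.2 * pvEnc c, -st.2)) (0, 1)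
    let c0 := match PySem.Str.pyGet? s 0 with | some c => c | none => ' '
    let total0 := p.1 + pvEnc c0
    let total := if PySem.Int.mod (PySem.Str.len s) 2 == 1 then -total0 else total0
    match PySem.Str.pyGet? "RWB" (PySem.Int.mod total 3) with
    | some c => String.ofList [c]
    | none => ""

-- ===== PRECONDITION & SPEC =====
-- Pre_ excludes the empty string (A raises IndexError) and multi-character strings containing a
-- non-colour character: there A either raises UnboundLocalError or returns a leftover value of its
-- loop variable, while B's numeric encoding naturally raises KeyError.
def Pre_solve_fast (s : String) : Prop :=
  s.toList ≠ [] ∧ (s.toList.length = 1 ∨ ∀ c ∈ s.toList, c = 'R' ∨ c = 'W' ∨ c = 'B')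
instance (s : String) : Decidable (Pre_solve_fast s) := by unfold Pre_solve_fast; infer_instance

def pvWitness_solve_fast : String := "R"

def Spec_solve_fast (s : String) (out : String) : Prop := out = solve_fast_alt s
instance (s : String) (out : String) : Decidable (Spec_solve_fast s out) := by unfold Spec_solve_fast; infer_instance

-- ===== CLAIM (what is proved, stated in full; the proofs are below) =====
def Claim_equal_solve_fast : Prop := ∀ (s : String), Dom_solve_fast s → Pre_solve_fast s → Spec_solve_fast s (solve_fast s)

-- ===== LEMMAS AND PROOFS =====

-- decode: 'RWB'[k] for k ∈ {0,1,2}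
def pvDec (k : Int) : Char := if k == 0 then 'R' else if k == 1 then 'W' else 'B'

-- the numeric combine rule and A's fold expressed on chars
def pvG (a b : Int) : Int := (-(a + b)) % 3
def pvComb (c1 c2 : Char) : Char := pvDec (pvG (pvEnc c1) (pvEnc c2))
def pvNumF (a : Int) (l : List Char) : Int := l.foldl (fun acc c => (-(acc + pvEnc c)) % 3) a
def pvAlt : List Char → Int
  | [] => 0
  | c :: cs => pvEnc c - pvAlt cs

def pvRWB (c : Char) : Prop := c = 'R' ∨ c = 'W' ∨ c = 'B'

lemma pvComb_valid {a b : Char} (ha : pvRWB a) (hb : pvRWB b) : pvRWB (pvComb a b) := by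
  rcases ha with h | h | h <;> rcases hb with h' | h' | h' <;> subst h <;> subst h' <;>
    (unfold pvRWB; decide)

lemma pvStepA_valid {a b : Char} (nc : Option Char) (ha : pvRWB a) (hb : pvRWB b) :
    pvStepA (some (a, nc)) b = some (pvComb a b, some (pvComb a b)) := by
  rcases ha with h | h | h <;> rcases hb with h' | h' | h' <;> subst h <;> subst h' <;> rfl

lemma pvFoldA (l : List Char) (hl : ∀ c ∈ l, pvRWB c) :
    ∀ (a : Char) (nc : Option Char), pvRWB a →
    ∃ nc', l.foldl pvStepA (some (a, nc)) = some (l.foldl pvComb a, nc') := by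
  induction l with
  | nil => intro a nc _; exact ⟨nc, rfl⟩
  | cons c cs ih =>
    intro a nc ha
    have hc : pvRWB c := hl c (by simp)
    have hcs : ∀ x ∈ cs, pvRWB x := fun x hx => hl x (by simp [hx])
    simp only [List.foldl_cons, pvStepA_valid nc ha hc]
    exact ih hcs (pvComb a c) _ (pvComb_valid ha hc)

lemma pvEnc_comb {a b : Char} (ha : pvRWB a) (hb : pvRWB b) :
    pvEnc (pvComb a b) = pvG (pvEnc a) (pvEnc b) := by
  rcases ha with h | h | h <;> rcases hb with h' | h' | h' <;> subst h <;> subst h' <;> decide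

lemma pvFoldComb_enc (l : List Char) (hl : ∀ c ∈ l, pvRWB c) :
    ∀ (a : Char), pvRWB a → pvEnc (l.foldl pvComb a) = pvNumF (pvEnc a) l := by
  induction l with
  | nil => intro a _; rfl
  | cons c cs ih =>
    intro a ha
    have hc : pvRWB c := hl c (by simp)
    have hcs : ∀ x ∈ cs, pvRWB x := fun x hx => hl x (by simp [hx])
    have h1 : pvNumF (pvEnc a) (c :: cs) = pvNumF (pvG (pvEnc a) (pvEnc c)) cs := rfl
    rw [List.foldl_cons, h1, ← pvEnc_comb ha hc]
    exact ih hcs _ (pvComb_valid ha hc)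

lemma pvFoldB (l : List Char) :
    ∀ (a sg : Int), (l.foldl (fun (st : Int × Int) c => (st.1 + st.2 * pvEnc c, -st.2)) (a, sg)).1
      = a + sg * pvAlt l := by
  induction l with
  | nil => intro a sg; simp [pvAlt]
  | cons c cs ih =>
    intro a sg
    simp only [List.foldl_cons, pvAlt]
    rw [ih]
    ring

lemma pvKey (l : List Char) :
    ∀ a : Int, 0 ≤ a → a < 3 →
      (0 ≤ pvNumF a l ∧ pvNumF a l < 3) ∧
      (pvNumF a l) % 3 = ((if Even l.length then (1:Int) else -1) * (a + pvAlt l)) % 3 := by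
  induction l with
  | nil => intro a h0 h3; refine ⟨⟨h0, h3⟩, ?_⟩; simp [pvNumF, pvAlt]
  | cons c cs ih =>
    intro a h0 h3
    have hb0 : (0:Int) ≤ (-(a + pvEnc c)) % 3 := by omega
    have hb3 : (-(a + pvEnc c)) % 3 < 3 := by omega
    obtain ⟨hrange, heq⟩ := ih _ hb0 hb3
    have hfold : pvNumF a (c :: cs) = pvNumF ((-(a + pvEnc c)) % 3) cs := rfl
    refine ⟨hfold ▸ hrange, ?_⟩
    rw [hfold, heq]
    by_cases h : Even cs.length
    · have h2 : ¬ Even (c :: cs).length := by simp [Nat.even_add_one, h]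
      rw [if_pos h, if_neg h2]
      simp only [pvAlt]
      omega
    · have h2 : Even (c :: cs).length := by simp [Nat.even_add_one, h]
      rw [if_neg h, if_pos h2]
      simp only [pvAlt]
      omega

lemma pvGetRWB {c : Char} (hc : pvRWB c) :
    PySem.Str.pyGet? "RWB" (pvEnc c) = some c := by
  rcases hc with h | h | h <;> subst h <;> decide

lemma pvFoldComb_mem (l : List Char) (hl : ∀ c ∈ l, pvRWB c) :
    ∀ a : Char, pvRWB a → pvRWB (l.foldl pvComb a) := by
  induction l with
  | nil => intro a ha; exact ha
  | cons c cs ih =>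
    intro a ha
    exact ih (fun x hx => hl x (by simp [hx])) _ (pvComb_valid ha (hl c (by simp)))

lemma pvEnc_range {c : Char} (hc : pvRWB c) : 0 ≤ pvEnc c ∧ pvEnc c < 3 := by
  rcases hc with h | h | h <;> subst h <;> decide

-- the length-1 case: both ports return the first character
lemma pv_len_one (s : String) (c0 : Char) (h : s.toList = [c0]) :
    solve_fast s = solve_fast_alt s := by
  unfold solve_fast solve_fast_alt
  simp [h, PySem.List.slice_from_one, PySem.Str.len_eq]

-- the main case: every character is a colour and there are at least two of them
lemma pv_main (s : String) (c0 : Char) (rest : List Char) (h : s.toList = c0 :: rest)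
    (hall : ∀ c ∈ s.toList, pvRWB c) (hlen : s.toList.length ≠ 1) :
    solve_fast s = solve_fast_alt s := by
  have hc0 : pvRWB c0 := hall c0 (by simp [h])
  have hrest : ∀ c ∈ rest, pvRWB c := fun c hc => hall c (by simp [h, hc])
  -- A's side
  obtain ⟨nc', hA⟩ := pvFoldA rest hrest c0 none hc0
  set X := rest.foldl pvComb c0 with hXdef
  have hX : pvRWB X := pvFoldComb_mem rest hrest c0 hc0
  have hget : PySem.Str.pyGet? s 0 = some c0 := by
    simp [h]
  have hAval : solve_fast s = String.ofList [X] := by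
    unfold solve_fast
    rw [hget]
    simp only [h, PySem.List.slice_from_one, List.tail_cons]
    simp [hA]
  -- B's side
  have hEncX : pvEnc X = pvNumF (pvEnc c0) rest := pvFoldComb_enc rest hrest c0 hc0
  obtain ⟨hr0, hr3⟩ := pvEnc_range hc0
  obtain ⟨⟨hn0, hn3⟩, hkey⟩ := pvKey rest (pvEnc c0) hr0 hr3
  have hBval : solve_fast_alt s = String.ofList [X] := by
    unfold solve_fast_alt
    have hrl : rest.length ≠ 0 := by
      rw [h] at hlen; simpa using hlen
    have hne1 : ¬ (PySem.Str.len s == 1) = true := by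
      simp only [PySem.Str.len_eq, h, List.length_cons, beq_iff_eq]
      omega
    rw [if_neg hne1, hget]
    simp only [h]
    have hp : ((c0 :: rest).foldl (fun (st : Int × Int) c => (st.1 + st.2 * pvEnc c, -st.2)) (0, 1)).1
        = pvAlt (c0 :: rest) := by
      rw [pvFoldB]; ring
    rw [hp]
    have htot : PySem.Int.mod ((if PySem.Int.mod (PySem.Str.len s) 2 == 1
          then -(pvAlt (c0 :: rest) + pvEnc c0) else pvAlt (c0 :: rest) + pvEnc c0)) 3
        = pvEnc X := by
      have hlen2 : PySem.Str.len s = ((rest.length : Int) + 1) := by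
        simp [PySem.Str.len_eq, h]
      rw [hEncX]
      have hnum : (pvNumF (pvEnc c0) rest) % 3 = pvNumF (pvEnc c0) rest :=
        Int.emod_emod_of_dvd _ (dvd_refl 3) ▸ Int.emod_eq_of_lt hn0 hn3
      have hm2 : PySem.Int.mod (PySem.Str.len s) 2 = ((rest.length : Int) + 1) % 2 := by
        rw [hlen2, PySem.Int.mod_eq_emod_of_pos (by norm_num : (0:Int) < 2)]
      by_cases hev : Even rest.length
      · have h1 : (PySem.Int.mod (PySem.Str.len s) 2 == 1) = true := by
          rw [hm2]
          simp only [beq_iff_eq]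
          obtain ⟨k, hk⟩ := hev
          omega
        rw [if_pos h1]
        rw [if_pos hev] at hkey
        rw [PySem.Int.mod_eq_emod_of_pos (by norm_num : (0:Int) < 3)]
        simp only [pvAlt]
        omega
      · have h1 : ¬ (PySem.Int.mod (PySem.Str.len s) 2 == 1) = true := by
          rw [hm2]
          simp only [beq_iff_eq]
          rw [Nat.not_even_iff] at hev
          omega
        rw [if_neg h1]
        rw [if_neg hev] at hkey
        rw [PySem.Int.mod_eq_emod_of_pos (by norm_num : (0:Int) < 3)]
        simp only [pvAlt]
        omega
    rw [htot, pvGetRWB hX]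
  rw [hAval, hBval]

-- ===== VERDICT (by name: the statement is the Claim_ definition above) =====
theorem solve_fast_spec : Claim_equal_solve_fast := by
  intro s _ hpre
  obtain ⟨hne, hcase⟩ := hpre
  unfold Spec_solve_fast
  obtain ⟨c0, rest, h⟩ : ∃ c0 rest, s.toList = c0 :: rest := by
    cases hl : s.toList with
    | nil => exact absurd hl hne
    | cons a l => exact ⟨a, l, rfl⟩
  by_cases hlen : s.toList.length = 1
  · have : rest = [] := by
      rw [h] at hlen; simpa using hlen
    exact pv_len_one s c0 (by rw [h, this])
  · rcases hcase with h1 | hall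
    · exact absurd h1 hlen
    · exact pv_main s c0 rest h hall hlen
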